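-- pv_equiv track=rewrite | github.com/zegging/keep_learning | data_structures_and_algorithms/test2.py | f
-- ===== SOURCE A (Python) =====
-- def f(stack: list):
--     res = stack.pop()
--     if stack == []:
--         return res
--     else:
--         last = f(stack)
--         stack.append(res) # 避免丢失刚刚出栈的元素，压回栈中，整个递归过程中只有栈底元素没有被压回来
--         return last
-- ===== SOURCE B (Python) =====
-- def f(stack: list):
--     return stack.pop(0)
-- ===== Notes on version B (the rewrite author's own statement) =====
-- stated objective: simpler
-- what changed: Replaces the O(n)-deep recursion that pops every element and re-pushes all but the bottom with a single stack.pop(0) that removes and returns the bottom element directly.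
import Mathlib
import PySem

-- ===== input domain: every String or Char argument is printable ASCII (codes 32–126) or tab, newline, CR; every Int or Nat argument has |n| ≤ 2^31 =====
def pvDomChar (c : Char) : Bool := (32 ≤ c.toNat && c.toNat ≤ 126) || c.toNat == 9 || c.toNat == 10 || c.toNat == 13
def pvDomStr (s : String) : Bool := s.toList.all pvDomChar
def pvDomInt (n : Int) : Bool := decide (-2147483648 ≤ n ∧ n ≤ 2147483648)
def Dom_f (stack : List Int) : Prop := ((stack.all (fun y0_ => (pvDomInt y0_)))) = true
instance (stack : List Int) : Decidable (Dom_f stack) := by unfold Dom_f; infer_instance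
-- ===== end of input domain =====

-- B replaces A's pop-all/re-push recursion with a single stack.pop(0); both mutate the
-- caller's list identically (remove the bottom element) — the theorems are about the return value.

-- ===== PORT A =====
-- Literal transliteration of A's recursion: res = stack.pop() (last element),
-- recurse on the remaining prefix; the append only restores the mutated list and
-- does not affect the return value.
def f (stack : List Int) : Int :=
  if hs : stack = [] then 0  -- Python raises IndexError here (excluded by Pre_f)
  else
    let res := stack.getLast hs
    let rest := stack.dropLast
    if rest = [] then res else f rest
termination_by stack.length
decreasing_by
  have h0 : stack.length ≠ 0 := fun h => hs (List.length_eq_zero_iff.mp h)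
  simp [List.length_dropLast]; omega

-- ===== PORT B =====
-- Transliteration of B: return stack.pop(0)
def f_alt (stack : List Int) : Int :=
  match PySem.List.pop? stack 0 with
  | some r => r.1
  | none => 0  -- Python raises IndexError here (excluded by Pre_f)

-- ===== PRECONDITION & SPEC =====
-- Pre_f: A (stack.pop()) and B (stack.pop(0)) both raise IndexError on the empty list.
def Pre_f (stack : List Int) : Prop := stack ≠ []
instance (stack : List Int) : Decidable (Pre_f stack) := by unfold Pre_f; infer_instance
def pvWitness_f : List Int := [3, 1, 2]

def Spec_f (stack : List Int) (out : Int) : Prop := out = f_alt stack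
instance (stack : List Int) (out : Int) : Decidable (Spec_f stack out) := by unfold Spec_f; infer_instance

-- ===== CLAIM (what is proved, stated in full; the proofs are below) =====
def Claim_equal_f : Prop := ∀ (stack : List Int), Dom_f stack → Pre_f stack → Spec_f stack (f stack)

-- ===== LEMMAS AND PROOFS =====

theorem f_eq_headD (stack : List Int) : f stack = stack.headD 0 := by
  induction stack using f.induct with
  | case1 => rw [f]; simp
  | case2 s hs rest hrest =>
      rw [f]
      rw [dif_neg hs, if_pos hrest]
      obtain ⟨a, t, rfl⟩ := List.exists_cons_of_ne_nil hs
      cases t with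
      | nil => simp
      | cons b u => exact absurd hrest (by simp : (a :: b :: u).dropLast ≠ [])
  | case3 s hs rest hrest ih =>
      rw [f]
      rw [dif_neg hs, if_neg hrest, ih]
      obtain ⟨a, t, rfl⟩ := List.exists_cons_of_ne_nil hs
      cases t with
      | nil => exact absurd (by simp : ([a] : List Int).dropLast = []) hrest
      | cons b u =>
          show ((a :: b :: u).dropLast).head?.getD 0 = a
          simp

-- ===== VERDICT (by name: the statement is the Claim_ definition above) =====
theorem f_spec : Claim_equal_f := by
  intro stack _ hpre
  unfold Spec_f
  obtain ⟨a, t, rfl⟩ := List.exists_cons_of_ne_nil hpre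
  rw [f_eq_headD]
  simp [f_alt, PySem.List.pop?_zero_cons]
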